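-- pv_equiv track=rewrite | github.com/pypi-data/pypi-mirror-9 | packages/euganke-latex-importer/euganke-latex-importer-0.2.tar.gz/euganke-latex-importer-0.2/importer/bober/BoberParser.py | cut_p
-- ===== SOURCE A (Python) =====
-- def cut_p(s):
--     forbidden_surrounding = ["<p>", "<div>"]
--     for niz in forbidden_surrounding:
--         l = len(niz)
--         closing = "</" + niz[1:]
--         if s[0:l] == niz and s[-(l+1):] == closing:
--             s = s[l:-(l+1)]
--             return s
--     return s
-- ===== SOURCE B (Python) =====
-- def cut_p(s):
--     # Parse the opening tag out of the input instead of looping over candidate patterns.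
--     if s.startswith("<"):
--         i = s.find(">")
--         if i != -1:
--             tag = s[1:i]
--             if tag in ("p", "div") and s.endswith("</" + tag + ">"):
--                 return s[i + 1 : -(i + 2)]
--     return s
-- ===== Notes on version B (the rewrite author's own statement) =====
-- stated objective: alternative
-- what changed: B parses the opening tag out of the string (find the first '>', read the tag name, test membership in {p, div}, check the matching closing suffix once) instead of A's loop over the two candidate patterns with per-pattern prefix/suffix slice comparisons.
import Mathlib
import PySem

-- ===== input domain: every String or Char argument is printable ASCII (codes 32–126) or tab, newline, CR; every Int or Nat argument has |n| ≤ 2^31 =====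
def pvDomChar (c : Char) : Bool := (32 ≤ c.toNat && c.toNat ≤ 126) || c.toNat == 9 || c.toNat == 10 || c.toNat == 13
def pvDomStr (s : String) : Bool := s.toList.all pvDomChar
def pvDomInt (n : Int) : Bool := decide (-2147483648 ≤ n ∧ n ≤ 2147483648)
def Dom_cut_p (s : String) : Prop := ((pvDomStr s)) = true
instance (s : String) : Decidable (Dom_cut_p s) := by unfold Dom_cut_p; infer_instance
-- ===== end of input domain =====

-- B parses the opening tag out of the input (find '>', check the tag name, check the matching
-- closing suffix) instead of A's loop over candidate patterns with slice comparisons; objective: alternative decomposition.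

-- ===== PORT A =====
-- for niz in forbidden_surrounding: … early return; the loop is the structural recursion on the pattern list.
def cut_pGo (s : String) : List String → String
  | [] => s
  | niz :: rest =>
    let l : Int := PySem.Str.len niz
    let closing : String := "</" ++ PySem.Str.slice niz (some 1) none
    if PySem.Str.slice s (some 0) (some l) = niz ∧
       PySem.Str.slice s (some (-(l + 1))) none = closing then
      PySem.Str.slice s (some l) (some (-(l + 1)))
    else cut_pGo s rest

def cut_p (s : String) : String := cut_pGo s ["<p>", "<div>"]

-- ===== PORT B =====
def cut_p_alt (s : String) : String :=
  if PySem.Str.startswith s "<" = true then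
    let i : Int := PySem.Str.find s ">"
    if i ≠ -1 then
      let tag : String := PySem.Str.slice s (some 1) (some i)
      if (tag = "p" ∨ tag = "div") ∧ PySem.Str.endswith s ("</" ++ tag ++ ">") = true then
        PySem.Str.slice s (some (i + 1)) (some (-(i + 2)))
      else s
    else s
  else s

-- ===== PRECONDITION & SPEC =====
def Spec_cut_p (s : String) (out : String) : Prop := out = cut_p_alt s
instance (s : String) (out : String) : Decidable (Spec_cut_p s out) := by unfold Spec_cut_p; infer_instance

-- ===== CLAIM (what is proved, stated in full; the proofs are below) =====
def Claim_equal_cut_p : Prop := ∀ (s : String), Dom_cut_p s → Spec_cut_p s (cut_p s)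

-- ===== LEMMAS AND PROOFS =====

lemma pvOfList_eq_iff (cs : List Char) (t : String) : (String.ofList cs = t) ↔ cs = t.toList :=
  ⟨fun h => by rw [← h]; simp, fun h => by rw [h, String.ofList_toList]⟩

lemma pvF1 : ("<p>" : String).toList = ['<', 'p', '>'] := by decide
lemma pvF2 : ("<div>" : String).toList = ['<', 'd', 'i', 'v', '>'] := by decide
lemma pvF3 : ("</p>" : String).toList = ['<', '/', 'p', '>'] := by decide
lemma pvF4 : ("</div>" : String).toList = ['<', '/', 'd', 'i', 'v', '>'] := by decide
lemma pvF5 : ("<" : String).toList = ['<'] := by decide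
lemma pvF6 : (">" : String).toList = ['>'] := by decide
lemma pvF7 : ("p" : String).toList = ['p'] := by decide
lemma pvF8 : ("div" : String).toList = ['d', 'i', 'v'] := by decide
lemma pvF11 : ("</" ++ PySem.Str.slice "<p>" (some 1) none) = "</p>" := by decide
lemma pvF12 : ("</" ++ PySem.Str.slice "<div>" (some 1) none) = "</div>" := by decide
lemma pvF13 : ("</" ++ "p" ++ ">" : String) = "</p>" := by decide
lemma pvF14 : ("</" ++ "div" ++ ">" : String) = "</div>" := by decide
lemma pvLenP : PySem.Str.len "<p>" = 3 := by simp [PySem.Str.len, pvF1]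
lemma pvLenDiv : PySem.Str.len "<div>" = 5 := by simp [PySem.Str.len, pvF2]

lemma pvStrSlice_eq (cs : List Char) (a b : Option Int) (t : String) :
    (PySem.Str.slice (String.ofList cs) a b = t) ↔ PySem.List.slice cs a b = t.toList := by
  simp [PySem.Str.slice, pvOfList_eq_iff]

lemma pvStrStartswith (cs : List Char) (p : String) :
    PySem.Str.startswith (String.ofList cs) p = PySem.Chars.startswith cs p.toList := by
  simp [PySem.Str.startswith]

lemma pvStrFind (cs : List Char) (sub : String) :
    PySem.Str.find (String.ofList cs) sub = PySem.Chars.find cs sub.toList := by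
  simp [PySem.Str.find]


lemma pvSlice_prefix (cs pat : List Char) :
    (PySem.List.slice cs (some 0) (some (pat.length : Int)) = pat) ↔ pat <+: cs := by
  have h1 : PySem.List.slice cs (some 0) (some (pat.length : Int)) = cs.take pat.length := by
    simp [PySem.List.slice, PySem.List.clampIdx]
    split_ifs <;> omega
  rw [h1]
  constructor
  · intro h; rw [← h]; exact List.take_prefix _ _
  · intro h; exact (List.prefix_iff_eq_take.mp h).symm

lemma pvSlice_suffix (cs pat : List Char) (h : pat ≠ []) :
    (PySem.List.slice cs (some (-(pat.length : Int))) none = pat) ↔ pat <:+ cs := by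
  have h1 : PySem.List.slice cs (some (-(pat.length : Int))) none = cs.drop (cs.length - pat.length) := by
    simp [PySem.List.slice, PySem.List.clampIdx]
    split_ifs with hneg hlt
    · have h0 : cs.length - pat.length = 0 := by omega
      rw [h0]
      simp
    · have h2 : ((cs.length : Int) + -(pat.length : Int)).toNat = cs.length - pat.length := by omega
      rw [h2]
      exact List.take_of_length_le (by simp)
    · exact absurd (List.length_pos_of_ne_nil h) (by omega)
  rw [h1]
  constructor
  · intro h; rw [← h]; exact List.drop_suffix _ _
  · intro h; exact (List.suffix_iff_eq_drop.mp h).symm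

lemma pvFindP (r : List Char) : PySem.Chars.find ('<' :: 'p' :: '>' :: r) ['>'] = 2 := by
  simp [PySem.Chars.find, PySem.Chars.find.go, List.isPrefixOf]

lemma pvFindDiv (r : List Char) : PySem.Chars.find ('<' :: 'd' :: 'i' :: 'v' :: '>' :: r) ['>'] = 4 := by
  simp [PySem.Chars.find, PySem.Chars.find.go, List.isPrefixOf]

lemma pvTagP (r : List Char) : PySem.List.slice ('<' :: 'p' :: '>' :: r) (some 1) (some 2) = ['p'] := by
  simp [PySem.List.slice, PySem.List.clampIdx]

lemma pvTagDiv (r : List Char) :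
    PySem.List.slice ('<' :: 'd' :: 'i' :: 'v' :: '>' :: r) (some 1) (some 4) = ['d', 'i', 'v'] := by
  simp [PySem.List.slice, PySem.List.clampIdx]

lemma pvGuard_prefix (t tag : List Char)
    (hi : PySem.Chars.find ('<' :: t) ['>'] ≠ -1)
    (htag : PySem.List.slice ('<' :: t) (some 1) (some (PySem.Chars.find ('<' :: t) ['>'])) = tag) :
    ('<' :: (tag ++ ['>'])) <+: ('<' :: t) := by
  set cs := '<' :: t with hcs
  set i := PySem.Chars.find cs ['>'] with hidef
  have hnn : 0 ≤ i := by have := PySem.Chars.neg_one_le_find cs ['>']; omega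
  have hle : i ≤ (cs.length : Int) := PySem.Chars.find_le_length cs ['>']
  have hle' : i.toNat ≤ t.length + 1 := by simp [hcs] at hle; omega
  obtain ⟨hpre, -⟩ := PySem.Chars.find_spec (s := cs) (sub := ['>']) hnn
  rw [← hidef] at hpre
  clear_value i
  have h1 : 1 ≤ i.toNat := by
    by_contra h0
    have hz : i.toNat = 0 := by omega
    rw [hz] at hpre
    simp [hcs, List.cons_prefix_cons] at hpre
  have hslice : tag = t.take (i.toNat - 1) := by
    rw [← htag]
    simp [PySem.List.slice, PySem.List.clampIdx, hcs]
    split_ifs <;> omega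
  have hdrop : cs.drop i.toNat = t.drop (i.toNat - 1) := by
    rw [hcs, show i.toNat = (i.toNat - 1) + 1 by omega]
    simp
  rw [hdrop] at hpre
  obtain ⟨r, hr⟩ := hpre
  refine ⟨r, ?_⟩
  simp only [hcs, List.cons_append, List.cons.injEq, List.append_assoc, List.nil_append, true_and]
  rw [hslice, show ('>' :: r : List Char) = List.drop (i.toNat - 1) t from hr]
  exact List.take_append_drop _ _

set_option maxHeartbeats 1000000 in
lemma pvA_p (r : List Char) :
    cut_p (String.ofList ('<' :: 'p' :: '>' :: r)) =
      if ("</p>" : String).toList <:+ ('<' :: 'p' :: '>' :: r) then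
        PySem.Str.slice (String.ofList ('<' :: 'p' :: '>' :: r)) (some 3) (some (-4))
      else String.ofList ('<' :: 'p' :: '>' :: r) := by
  have hc1 : PySem.Str.slice (String.ofList ('<' :: 'p' :: '>' :: r)) (some 0) (some 3) = "<p>" := by
    rw [pvStrSlice_eq, pvF1]
    exact (pvSlice_prefix _ ['<', 'p', '>']).mpr ⟨r, rfl⟩
  have hc2 : (PySem.Str.slice (String.ofList ('<' :: 'p' :: '>' :: r)) (some (-4)) none = "</p>") ↔
      ("</p>" : String).toList <:+ ('<' :: 'p' :: '>' :: r) := by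
    rw [pvStrSlice_eq, pvF3]
    exact pvSlice_suffix _ ['<', '/', 'p', '>'] (by simp)
  have hdivno : ¬ (PySem.Str.slice (String.ofList ('<' :: 'p' :: '>' :: r)) (some 0) (some 5) = "<div>") := by
    rw [pvStrSlice_eq, pvF2,
      show ((5 : Int)) = ((['<', 'd', 'i', 'v', '>'] : List Char).length : Int) by norm_num,
      pvSlice_prefix]
    simp [List.cons_prefix_cons]
  simp only [cut_p, cut_pGo, pvLenP, pvLenDiv, pvF11, pvF12]
  norm_num [hc1, hdivno]
  exact if_congr hc2 rfl rfl

set_option maxHeartbeats 1000000 in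
lemma pvB_p (r : List Char) :
    cut_p_alt (String.ofList ('<' :: 'p' :: '>' :: r)) =
      if ("</p>" : String).toList <:+ ('<' :: 'p' :: '>' :: r) then
        PySem.Str.slice (String.ofList ('<' :: 'p' :: '>' :: r)) (some 3) (some (-4))
      else String.ofList ('<' :: 'p' :: '>' :: r) := by
  have hst : PySem.Str.startswith (String.ofList ('<' :: 'p' :: '>' :: r)) "<" = true := by
    rw [pvStrStartswith, pvF5]
    simp [PySem.Chars.startswith, List.isPrefixOf]
  have hfind : PySem.Str.find (String.ofList ('<' :: 'p' :: '>' :: r)) ">" = 2 := by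
    rw [pvStrFind, pvF6, pvFindP]
  have htag : PySem.Str.slice (String.ofList ('<' :: 'p' :: '>' :: r)) (some 1) (some 2) = "p" := by
    rw [pvStrSlice_eq, pvF7, pvTagP]
  simp only [cut_p_alt, hst, hfind, htag, pvF13, if_true]
  norm_num
  exact if_congr (PySem.Chars.endswith_iff _ _) rfl rfl

set_option maxHeartbeats 1000000 in
lemma pvA_div (r : List Char) :
    cut_p (String.ofList ('<' :: 'd' :: 'i' :: 'v' :: '>' :: r)) =
      if ("</div>" : String).toList <:+ ('<' :: 'd' :: 'i' :: 'v' :: '>' :: r) then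
        PySem.Str.slice (String.ofList ('<' :: 'd' :: 'i' :: 'v' :: '>' :: r)) (some 5) (some (-6))
      else String.ofList ('<' :: 'd' :: 'i' :: 'v' :: '>' :: r) := by
  have hc1p : ¬ (PySem.Str.slice (String.ofList ('<' :: 'd' :: 'i' :: 'v' :: '>' :: r)) (some 0) (some 3) = "<p>") := by
    rw [pvStrSlice_eq, pvF1,
      show ((3 : Int)) = ((['<', 'p', '>'] : List Char).length : Int) by norm_num, pvSlice_prefix]
    simp [List.cons_prefix_cons]
  have hc1 : PySem.Str.slice (String.ofList ('<' :: 'd' :: 'i' :: 'v' :: '>' :: r)) (some 0) (some 5) = "<div>" := by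
    rw [pvStrSlice_eq, pvF2]
    exact (pvSlice_prefix _ ['<', 'd', 'i', 'v', '>']).mpr ⟨r, rfl⟩
  have hc2 : (PySem.Str.slice (String.ofList ('<' :: 'd' :: 'i' :: 'v' :: '>' :: r)) (some (-6)) none = "</div>") ↔
      ("</div>" : String).toList <:+ ('<' :: 'd' :: 'i' :: 'v' :: '>' :: r) := by
    rw [pvStrSlice_eq, pvF4]
    exact pvSlice_suffix _ ['<', '/', 'd', 'i', 'v', '>'] (by simp)
  simp only [cut_p, cut_pGo, pvLenP, pvLenDiv, pvF11, pvF12]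
  norm_num [hc1p, hc1]
  exact if_congr hc2 rfl rfl

set_option maxHeartbeats 1000000 in
lemma pvB_div (r : List Char) :
    cut_p_alt (String.ofList ('<' :: 'd' :: 'i' :: 'v' :: '>' :: r)) =
      if ("</div>" : String).toList <:+ ('<' :: 'd' :: 'i' :: 'v' :: '>' :: r) then
        PySem.Str.slice (String.ofList ('<' :: 'd' :: 'i' :: 'v' :: '>' :: r)) (some 5) (some (-6))
      else String.ofList ('<' :: 'd' :: 'i' :: 'v' :: '>' :: r) := by
  have hst : PySem.Str.startswith (String.ofList ('<' :: 'd' :: 'i' :: 'v' :: '>' :: r)) "<" = true := by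
    rw [pvStrStartswith, pvF5]
    simp [PySem.Chars.startswith, List.isPrefixOf]
  have hfind : PySem.Str.find (String.ofList ('<' :: 'd' :: 'i' :: 'v' :: '>' :: r)) ">" = 4 := by
    rw [pvStrFind, pvF6, pvFindDiv]
  have htag : PySem.Str.slice (String.ofList ('<' :: 'd' :: 'i' :: 'v' :: '>' :: r)) (some 1) (some 4) = "div" := by
    rw [pvStrSlice_eq, pvF8, pvTagDiv]
  simp only [cut_p_alt, hst, hfind, htag, pvF14, if_true]
  norm_num
  exact if_congr (PySem.Chars.endswith_iff _ _) rfl rfl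

set_option maxHeartbeats 1000000 in
lemma pvA_other (cs : List Char) (hp : ¬ ('<' :: 'p' :: '>' :: []) <+: cs)
    (hd : ¬ ('<' :: 'd' :: 'i' :: 'v' :: '>' :: []) <+: cs) :
    cut_p (String.ofList cs) = String.ofList cs := by
  have h1 : ¬ (PySem.Str.slice (String.ofList cs) (some 0) (some 3) = "<p>") := by
    rw [pvStrSlice_eq, pvF1,
      show ((3 : Int)) = ((['<', 'p', '>'] : List Char).length : Int) by norm_num, pvSlice_prefix]
    exact hp
  have h2 : ¬ (PySem.Str.slice (String.ofList cs) (some 0) (some 5) = "<div>") := by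
    rw [pvStrSlice_eq, pvF2,
      show ((5 : Int)) = ((['<', 'd', 'i', 'v', '>'] : List Char).length : Int) by norm_num,
      pvSlice_prefix]
    exact hd
  simp only [cut_p, cut_pGo, pvLenP, pvLenDiv, pvF11, pvF12, h1, h2, false_and, if_false]

set_option maxHeartbeats 1000000 in
lemma pvB_other (cs : List Char) (hp : ¬ ('<' :: 'p' :: '>' :: []) <+: cs)
    (hd : ¬ ('<' :: 'd' :: 'i' :: 'v' :: '>' :: []) <+: cs) :
    cut_p_alt (String.ofList cs) = String.ofList cs := by
  by_cases hst : PySem.Str.startswith (String.ofList cs) "<" = true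
  · have hpre := (PySem.Chars.startswith_iff _ _).mp (by rw [pvStrStartswith, pvF5] at hst; exact hst)
    obtain ⟨t, ht⟩ := hpre
    subst ht
    simp only [List.cons_append, List.nil_append] at hp hd hst ⊢
    by_cases hi : PySem.Str.find (String.ofList ('<' :: t)) ">" = -1
    · simp only [cut_p_alt, hst, if_true, hi, ne_eq, not_true_eq_false, if_false]
    · have hor : ¬ ((PySem.Str.slice (String.ofList ('<' :: t)) (some 1)
          (some (PySem.Str.find (String.ofList ('<' :: t)) ">")) = "p") ∨
          (PySem.Str.slice (String.ofList ('<' :: t)) (some 1)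
          (some (PySem.Str.find (String.ofList ('<' :: t)) ">")) = "div")) := by
        rw [pvStrFind, pvF6] at hi ⊢
        rintro (htg | htg)
        · rw [pvStrSlice_eq, pvF7] at htg
          exact hp (pvGuard_prefix t ['p'] hi htg)
        · rw [pvStrSlice_eq, pvF8] at htg
          exact hd (pvGuard_prefix t ['d', 'i', 'v'] hi htg)
      simp only [cut_p_alt, hst, if_true, ne_eq, hi, not_false_eq_true]
      rw [if_neg]
      rintro ⟨h, -⟩
      exact hor h
  · simp only [cut_p_alt]
    rw [if_neg hst]

theorem cut_p_key (cs : List Char) : cut_p (String.ofList cs) = cut_p_alt (String.ofList cs) := by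
  by_cases hp : ('<' :: 'p' :: '>' :: []) <+: cs
  · obtain ⟨r, hr⟩ := hp
    simp only [List.cons_append, List.nil_append] at hr
    rw [← hr, pvA_p, pvB_p]
  · by_cases hd : ('<' :: 'd' :: 'i' :: 'v' :: '>' :: []) <+: cs
    · obtain ⟨r, hr⟩ := hd
      simp only [List.cons_append, List.nil_append] at hr
      rw [← hr, pvA_div, pvB_div]
    · rw [pvA_other cs hp hd, pvB_other cs hp hd]

-- ===== VERDICT (by name: the statement is the Claim_ definition above) =====
theorem cut_p_spec : Claim_equal_cut_p := by
  intro s _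
  unfold Spec_cut_p
  have h : String.ofList s.toList = s := String.ofList_toList
  rw [← h]
  exact cut_p_key s.toList
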